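-- pv_equiv track=rewrite | github.com/facuguerrero/trainingExercises | arraymutation/array_mutation.py | solution
-- ===== SOURCE A (Python) =====
-- def solution(n, a):
--     solution = []
--     for i in range(0, n):
--         first_term = a[i - 1] if (i > 0) else 0
--         second_term = a[i]
--         third_term = a[i + 1] if (i < n - 1) else 0
--         solution.append(first_term + second_term + third_term)
--     return solution
-- ===== SOURCE B (Python) =====
-- def solution(n, a):
--     # Prefix sums: p[j] = a[0] + ... + a[j-1]; each answer is a difference of two prefix sums.
--     p = [0]
--     s = 0
--     for i in range(n):
--         s += a[i]
--         p.append(s)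
--     return [p[min(i + 2, n)] - p[max(i - 1, 0)] for i in range(n)]
-- ===== Notes on version B (the rewrite author's own statement) =====
-- stated objective: alternative
-- what changed: Computes a prefix-sum array once and produces each output as the difference p[min(i+2,n)] - p[max(i-1,0)] of two prefix sums, instead of summing each element with conditionally-guarded neighbors.
import Mathlib
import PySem

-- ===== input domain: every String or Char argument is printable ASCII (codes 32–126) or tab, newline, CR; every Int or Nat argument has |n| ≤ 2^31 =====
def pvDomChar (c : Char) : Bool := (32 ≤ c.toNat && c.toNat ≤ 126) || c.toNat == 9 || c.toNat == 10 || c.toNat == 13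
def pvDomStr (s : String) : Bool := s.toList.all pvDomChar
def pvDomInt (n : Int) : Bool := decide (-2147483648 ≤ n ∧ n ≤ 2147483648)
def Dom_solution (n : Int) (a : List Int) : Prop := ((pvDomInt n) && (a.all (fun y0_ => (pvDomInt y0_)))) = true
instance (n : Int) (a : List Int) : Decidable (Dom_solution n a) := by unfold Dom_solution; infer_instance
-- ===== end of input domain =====

-- B builds a prefix-sum array and returns each neighbor sum as a difference of two
-- prefix sums, replacing A's per-index conditional neighbor additions (objective: alternative).

-- ===== PORT A =====
def solution (n : Int) (a : List Int) : List Int :=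
  (PySem.List.pyRange 0 n 1).foldl (fun acc i =>
    acc ++ [(if i > 0 then PySem.List.pyGetD a (i - 1) 0 else 0)
            + PySem.List.pyGetD a i 0
            + (if i < n - 1 then PySem.List.pyGetD a (i + 1) 0 else 0)]) []

-- ===== PORT B =====
def solution_alt (n : Int) (a : List Int) : List Int :=
  let ps := (PySem.List.pyRange 0 n 1).foldl
    (fun (ps : List Int × Int) i =>
      let s := ps.2 + PySem.List.pyGetD a i 0
      (ps.1 ++ [s], s)) ([0], 0)
  (PySem.List.pyRange 0 n 1).map (fun i =>
    PySem.List.pyGetD ps.1 (min (i + 2) n) 0 - PySem.List.pyGetD ps.1 (max (i - 1) 0) 0)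

-- ===== PRECONDITION & SPEC =====
-- Pre_ excludes exactly the inputs where both Pythons raise IndexError (0 < n and len(a) < n).
def Pre_solution (n : Int) (a : List Int) : Prop := n ≤ PySem.List.len a ∨ n ≤ 0
instance (n : Int) (a : List Int) : Decidable (Pre_solution n a) := by unfold Pre_solution; infer_instance
def pvWitness_solution : Int × List Int := (3, [1, 2, 3])
def Spec_solution (n : Int) (a : List Int) (out : List Int) : Prop := out = solution_alt n a
instance (n : Int) (a : List Int) (out : List Int) : Decidable (Spec_solution n a out) := by unfold Spec_solution; infer_instance

-- ===== CLAIM (what is proved, stated in full; the proofs are below) =====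
def Claim_equal_solution : Prop := ∀ (n : Int) (a : List Int), Dom_solution n a → Pre_solution n a → Spec_solution n a (solution n a)

-- ===== LEMMAS AND PROOFS =====

-- The prefix-sum list B builds: p[j] = sum of the first j elements.
def pList (a : List Int) (nn : Nat) : List Int :=
  (List.range (nn + 1)).map (fun j => (a.take j).sum)

lemma take_succ_sum (a : List Int) (j : Nat) (hj : j < a.length) :
    (a.take (j + 1)).sum = (a.take j).sum + a.getD j 0 := by
  rw [List.take_add_one, List.sum_append, List.getD_eq_getElem?_getD,
    List.getElem?_eq_getElem hj]
  simp

lemma pList_getD (a : List Int) (nn j : Nat) (hj : j ≤ nn) :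
    (pList a nn).getD j 0 = (a.take j).sum := by
  unfold pList
  rw [List.getD_eq_getElem?_getD, List.getElem?_map, List.getElem?_range (by omega)]
  simp

lemma build_pList (a : List Int) (nn : Nat) (h : nn ≤ a.length) :
    (List.map (fun k : Nat => (0 : Int) + k) (List.range nn)).foldl
      (fun (ps : List Int × Int) i =>
        (ps.1 ++ [ps.2 + PySem.List.pyGetD a i 0], ps.2 + PySem.List.pyGetD a i 0)) ([0], 0)
    = (pList a nn, (a.take nn).sum) := by
  induction nn with
  | zero => simp [pList]
  | succ m ih =>
    rw [List.range_succ, List.map_append, List.foldl_append, ih (by omega)]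
    have hm : m < a.length := by omega
    simp only [List.map_cons, List.map_nil, List.foldl_cons, List.foldl_nil,
      zero_add, PySem.List.pyGetD_natCast]
    rw [← take_succ_sum a m hm]
    unfold pList
    rw [List.range_succ (n := m + 1), List.map_append]
    simp

lemma solution_eq_alt (n : Int) (a : List Int)
    (hpre : n ≤ PySem.List.len a ∨ n ≤ 0) : solution n a = solution_alt n a := by
  have hlen : (n - 0).toNat ≤ a.length := by
    simp [PySem.List.len_eq] at hpre; omega
  simp only [solution, solution_alt, PySem.List.pyRange_one]
  rw [PySem.List.foldl_append_singleton_eq_map, build_pList a ((n - 0).toNat) hlen]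
  simp only [List.map_map]
  apply List.map_congr_left
  intro k hk
  have hk' : k < (n - 0).toNat := List.mem_range.mp hk
  set nn := (n - 0).toNat with hnn
  have hn : n = (nn : Int) := by omega
  simp only [Function.comp_def, zero_add]
  have cmin : min ((k : Int) + 2) n = ((min (k + 2) nn : Nat) : Int) := by omega
  have cmax : max ((k : Int) - 1) 0 = ((k - 1 : Nat) : Int) := by omega
  rw [cmin, cmax]
  simp only [PySem.List.pyGetD_natCast]
  rw [pList_getD a nn _ (by omega), pList_getD a nn _ (by omega)]
  by_cases hk0 : k = 0
  · subst hk0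
    by_cases h1 : ((0 : Int)) < n - 1
    · have h2 : min (0 + 2) nn = 2 := by omega
      rw [h2, take_succ_sum a 1 (by omega), take_succ_sum a 0 (by omega)]
      rw [if_neg (by norm_num : ¬ (((0 : Nat) : Int)) > 0),
        if_pos (by norm_num; omega : (((0 : Nat) : Int)) < n - 1),
        show (((0 : Nat) : Int)) + 1 = ((1 : Nat) : Int) by norm_num,
        PySem.List.pyGetD_natCast]
      simp
    · have h2 : min (0 + 2) nn = 1 := by omega
      rw [h2, take_succ_sum a 0 (by omega)]
      rw [if_neg (by norm_num : ¬ (((0 : Nat) : Int)) > 0),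
        if_neg (by norm_num; omega : ¬ (((0 : Nat) : Int)) < n - 1)]
      simp
  · obtain ⟨m, rfl⟩ : ∃ m, k = m + 1 := ⟨k - 1, by omega⟩
    push_cast
    have hgt : ((m : Int) + 1) > 0 := by positivity
    have hmidx : ((m : Int) + 1 - 1) = ((m : Nat) : Int) := by omega
    rw [if_pos hgt, hmidx, PySem.List.pyGetD_natCast]
    by_cases h1 : ((m : Int) + 1) < n - 1
    · have h2 : min (m + 1 + 2) nn = m + 3 := by omega
      rw [h2,
        take_succ_sum a (m + 2) (by omega), take_succ_sum a (m + 1) (by omega),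
        take_succ_sum a m (by omega)]
      have hplus : ((m : Int) + 1 + 1) = ((m + 2 : Nat) : Int) := by omega
      rw [if_pos h1, hplus, PySem.List.pyGetD_natCast]
      ring
    · have h2 : min (m + 1 + 2) nn = m + 2 := by omega
      rw [h2,
        take_succ_sum a (m + 1) (by omega), take_succ_sum a m (by omega)]
      rw [if_neg h1]
      ring

-- ===== VERDICT (by name: the statement is the Claim_ definition above) =====
theorem solution_spec : Claim_equal_solution := by
  intro n a _ hpre
  exact solution_eq_alt n a hpre
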